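-- pv_equiv track=rewrite | github.com/nimbleapproach/dojo-dbx-adf | databricks_cicd/notebooks/gold/orion/nb-orion-meta.py | count_run_groups_by_type
-- ===== SOURCE A (Python) =====
-- from collections import defaultdict
-- from collections import defaultdict
-- from collections import defaultdict
--
-- def count_run_groups_by_type(data):
--     type_run_groups = defaultdict(set)
--
--     for entity, attributes in data.items():
--         entity_type = attributes.get('type')
--         run_group = attributes.get('run_group')
--
--         if entity_type is not None and run_group is not None:
--             type_run_groups[entity_type].add(run_group)
--
--     result = {
--         entity_type: len(run_groups)
--         for entity_type, run_groups in type_run_groups.items()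
--     }
--
--     return result
-- ===== SOURCE B (Python) =====
-- def count_run_groups_by_type(data):
--     # Stage 1: flatten to the list of valid (type, run_group) pairs (duplicates kept).
--     pairs = [(a.get('type'), a.get('run_group')) for a in data.values()]
--     pairs = [(t, r) for t, r in pairs if t is not None and r is not None]
--     # Stage 2: for each type at its first occurrence, count its distinct run_groups
--     # by a fresh scan over the flat pair list.
--     result = {}
--     for t, _ in pairs:
--         if t not in result:
--             result[t] = len({r for t2, r in pairs if t2 == t})
--     return result
-- ===== Notes on version B (the rewrite author's own statement) =====
-- stated objective: alternative
-- what changed: B replaces A's single-pass dict-of-sets grouping with staged passes: it first flattens the input to the list of valid (type, run_group) pairs, then, at each type's first occurrence, counts that type's distinct run_groups by a fresh scan over the flat pair list, so no per-type set is maintained incrementally.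
import Mathlib
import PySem

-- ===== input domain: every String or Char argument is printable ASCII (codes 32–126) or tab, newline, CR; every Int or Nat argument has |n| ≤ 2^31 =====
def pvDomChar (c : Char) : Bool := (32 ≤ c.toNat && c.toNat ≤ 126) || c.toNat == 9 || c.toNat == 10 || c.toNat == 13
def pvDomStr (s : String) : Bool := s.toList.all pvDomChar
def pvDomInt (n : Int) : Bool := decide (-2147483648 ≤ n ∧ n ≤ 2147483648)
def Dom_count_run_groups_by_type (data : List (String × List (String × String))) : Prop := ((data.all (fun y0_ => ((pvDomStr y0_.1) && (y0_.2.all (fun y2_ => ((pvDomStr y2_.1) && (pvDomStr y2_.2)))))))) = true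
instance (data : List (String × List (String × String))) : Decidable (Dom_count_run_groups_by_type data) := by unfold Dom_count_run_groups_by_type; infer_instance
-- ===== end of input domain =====

-- B replaces A's one-pass dict-of-sets with staged passes: flatten to the valid
-- (type, run_group) pair list, then count each type's distinct run_groups by a fresh
-- scan at the type's first occurrence (objective: alternative decomposition, same result).


-- ===== PORT A =====
-- attributes.get('type') / attributes.get('run_group'); the guarded defaultdict[set] step
def pvStepA (tr : PySem.Dict String (PySem.Set String)) (ea : String × List (String × String)) :
    PySem.Dict String (PySem.Set String) :=
  let attrs : PySem.Dict String String := PySem.Dict.mk ea.2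
  match attrs.get? "type", attrs.get? "run_group" with
  | some t, some r => tr.modify t PySem.Set.empty (fun s => s.add r)
  | _, _ => tr

def count_run_groups_by_type (data : List (String × List (String × String))) : List (String × Int) :=
  let type_run_groups := data.foldl pvStepA PySem.Dict.empty
  type_run_groups.items.map (fun p => (p.1, PySem.Set.len p.2))

-- ===== PORT B =====
def count_run_groups_by_type_alt (data : List (String × List (String × String))) : List (String × Int) :=
  -- stage 1: [(a.get('type'), a.get('run_group')) for a in data.values()], then keep valid pairs
  let pairs0 : List (Option String × Option String) :=
    data.map (fun ea =>
      let attrs : PySem.Dict String String := PySem.Dict.mk ea.2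
      (attrs.get? "type", attrs.get? "run_group"))
  let pairs : List (String × String) :=
    pairs0.filterMap (fun tr =>
      match tr with
      | (some t, some r) => some (t, r)
      | _ => none)
  -- stage 2: at each type's first occurrence, count its distinct run_groups by a fresh scan
  let result : PySem.Dict String Int :=
    pairs.foldl (fun res p =>
      if res.contains p.1 then res
      else res.insert p.1 (PySem.Set.len (PySem.Set.ofList
        (pairs.filterMap (fun q => if q.1 == p.1 then some q.2 else none))))) PySem.Dict.empty
  result.items

-- ===== PRECONDITION & SPEC =====
def Spec_count_run_groups_by_type (data : List (String × List (String × String))) (out : List (String × Int)) : Prop := out = count_run_groups_by_type_alt data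
instance (data : List (String × List (String × String))) (out : List (String × Int)) : Decidable (Spec_count_run_groups_by_type data out) := by unfold Spec_count_run_groups_by_type; infer_instance

-- ===== CLAIM (what is proved, stated in full; the proofs are below) =====
def Claim_equal_count_run_groups_by_type : Prop := ∀ (data : List (String × List (String × String))), Dom_count_run_groups_by_type data → Spec_count_run_groups_by_type data (count_run_groups_by_type data)

-- ===== LEMMAS AND PROOFS =====

-- the valid (type, run_group) pair of one entity, if both are present
def pvVP (ea : String × List (String × String)) : Option (String × String) :=
  let attrs : PySem.Dict String String := PySem.Dict.mk ea.2
  match attrs.get? "type", attrs.get? "run_group" with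
  | some t, some r => some (t, r)
  | _, _ => none

-- the run_groups listed (with repeats, in order) for type t among the pairs ps
def pvRgs (ps : List (String × String)) (t : String) : List String :=
  ps.filterMap (fun q => if q.1 == t then some q.2 else none)

theorem pvFoldA_eq (data : List (String × List (String × String)))
    (d : PySem.Dict String (PySem.Set String)) :
    data.foldl pvStepA d
      = (data.filterMap pvVP).foldl
          (fun d p => d.modify p.1 PySem.Set.empty (fun s => s.add p.2)) d := by
  induction data generalizing d with
  | nil => rfl
  | cons ea rest ih =>
      simp only [List.foldl_cons, List.filterMap_cons]
      have hstep : pvStepA d ea = (match pvVP ea with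
          | some p => d.modify p.1 PySem.Set.empty (fun s => s.add p.2)
          | none => d) := by
        unfold pvStepA pvVP
        cases h1 : (PySem.Dict.mk ea.2 : PySem.Dict String String).get? "type" <;>
          cases h2 : (PySem.Dict.mk ea.2 : PySem.Dict String String).get? "run_group" <;>
          simp [h1, h2]
      rw [hstep]
      cases h : pvVP ea with
      | none => simp [ih]
      | some p => simp [ih]

theorem pvPairsB_eq (data : List (String × List (String × String))) :
    (data.map (fun ea =>
      let attrs : PySem.Dict String String := PySem.Dict.mk ea.2
      (attrs.get? "type", attrs.get? "run_group"))).filterMap (fun tr =>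
        match tr with
        | (some t, some r) => some (t, r)
        | _ => none) = data.filterMap pvVP := by
  rw [List.filterMap_map]
  apply List.filterMap_congr
  intro ea _
  unfold pvVP
  cases h1 : (PySem.Dict.mk ea.2 : PySem.Dict String String).get? "type" <;>
    cases h2 : (PySem.Dict.mk ea.2 : PySem.Dict String String).get? "run_group" <;>
    simp [h1, h2]

-- A's fold, read at one key: the run_groups of t accumulate by Set.update
theorem pvA_getD (ps : List (String × String)) (d : PySem.Dict String (PySem.Set String))
    (t : String) :
    (ps.foldl (fun d p => d.modify p.1 PySem.Set.empty (fun s => s.add p.2)) d).getD t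
        PySem.Set.empty
      = PySem.Set.update (d.getD t PySem.Set.empty) (pvRgs ps t) := by
  induction ps generalizing d with
  | nil => simp [pvRgs, PySem.Set.update]
  | cons p rest ih =>
      simp only [List.foldl_cons]
      rw [ih]
      by_cases ht : p.1 = t
      · subst ht
        have h1 : pvRgs (p :: rest) p.1 = p.2 :: pvRgs rest p.1 := by simp [pvRgs]
        rw [h1, PySem.Set.update_cons]
        have h2 : (d.modify p.1 PySem.Set.empty (fun s => s.add p.2)).getD p.1 PySem.Set.empty
            = (d.getD p.1 PySem.Set.empty).add p.2 :=
          PySem.Dict.getD_modify_self d p.1 PySem.Set.empty (fun s => s.add p.2)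
        rw [h2]
      · have h1 : pvRgs (p :: rest) t = pvRgs rest t := by simp [pvRgs, ht]
        have h2 : (d.modify p.1 PySem.Set.empty (fun s => s.add p.2)).getD t PySem.Set.empty
            = d.getD t PySem.Set.empty :=
          PySem.Dict.getD_modify_of_ne d PySem.Set.empty (fun s => s.add p.2)
            (fun h : t = p.1 => ht (Eq.symm h))
        rw [h1, h2]

-- A's fold from empty: keys are the types in first-occurrence order
theorem pvA_keys (ps : List (String × String)) :
    (ps.foldl (fun d p => d.modify p.1 PySem.Set.empty (fun s => s.add p.2))
        (PySem.Dict.empty : PySem.Dict String (PySem.Set String))).keys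
      = PySem.Set.ofList (ps.map Prod.fst) := by
  rw [PySem.Dict.keys_foldl_modify_key]
  simp [PySem.Dict.keys_empty, PySem.Set.update_nil_left]

-- B's fold, read at one key
theorem pvB_get? (ps : List (String × String)) (val : String → Int)
    (d : PySem.Dict String Int) (t : String) :
    (ps.foldl (fun res p =>
        if res.contains p.1 then res else res.insert p.1 (val p.1)) d).get? t
      = if d.contains t then d.get? t
        else if t ∈ ps.map Prod.fst then some (val t) else none := by
  induction ps generalizing d with
  | nil =>
      by_cases hc : d.contains t
      · simp [hc]
      · have : d.get? t = none := (PySem.Dict.get?_eq_none_iff_not_mem_keys d t).mpr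
          (fun h => hc ((PySem.Dict.contains_iff_mem_keys d t).mpr h))
        simp [hc, this]
  | cons p rest ih =>
      simp only [List.foldl_cons, List.map_cons, List.mem_cons]
      by_cases hp : d.contains p.1
      · rw [if_pos hp, ih]
        by_cases hc : d.contains t
        · simp [hc]
        · have hne : ¬ t = p.1 := fun h => hc (h ▸ hp)
          rw [if_neg hc, if_neg hc, if_congr (or_iff_right hne) rfl rfl]
      · rw [if_neg hp, ih]
        by_cases ht : t = p.1
        · subst ht
          have h1 : (d.insert p.1 (val p.1)).contains p.1 = true :=
            PySem.Dict.contains_insert_self d p.1 _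
          have h2 : (d.insert p.1 (val p.1)).get? p.1 = some (val p.1) :=
            PySem.Dict.get?_insert_self d p.1 _
          simp [h1, h2, hp]
        · rw [PySem.Dict.get?_insert_of_ne _ _ ht]
          have h1 : (d.insert p.1 (val p.1)).contains t = d.contains t := by
            rw [PySem.Dict.contains_insert]
            simp [ht]
          rw [h1]
          by_cases hc : d.contains t
          · simp [hc]
          · rw [if_neg hc, if_neg hc, if_congr (or_iff_right ht) rfl rfl]

-- B's fold from empty: same keys, in the same first-occurrence order
theorem pvB_keys (ps : List (String × String)) (val : String → Int) :
    (ps.foldl (fun res p =>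
        if res.contains p.1 then res else res.insert p.1 (val p.1))
        (PySem.Dict.empty : PySem.Dict String Int)).keys
      = PySem.Set.ofList (ps.map Prod.fst) := by
  suffices h : ∀ d : PySem.Dict String Int,
      (ps.foldl (fun res p =>
        if res.contains p.1 then res else res.insert p.1 (val p.1)) d).keys
      = PySem.Set.update d.keys (ps.map Prod.fst) by
    rw [h]
    simp [PySem.Dict.keys_empty, PySem.Set.update_nil_left]
  induction ps with
  | nil => intro d; simp [PySem.Set.update]
  | cons p rest ih =>
      intro d
      simp only [List.foldl_cons, List.map_cons, PySem.Set.update_cons]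
      by_cases hp : d.contains p.1
      · rw [if_pos hp, ih]
        have : PySem.Set.add d.keys p.1 = d.keys :=
          PySem.Set.add_of_mem ((PySem.Dict.contains_iff_mem_keys d p.1).mp hp)
        rw [this]
      · rw [if_neg hp, ih]
        have h1 : (d.insert p.1 (val p.1)).keys = d.keys ++ [p.1] :=
          PySem.Dict.keys_insert_of_not_contains d (val p.1) (by simpa using hp)
        rw [h1]
        have h2 : PySem.Set.add d.keys p.1 = d.keys ++ [p.1] :=
          PySem.Set.add_of_not_mem
            (fun h => hp ((PySem.Dict.contains_iff_mem_keys d p.1).mpr h))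
        rw [h2]

-- ===== VERDICT (by name: the statement is the Claim_ definition above) =====
theorem count_run_groups_by_type_spec : Claim_equal_count_run_groups_by_type := by
  intro data _
  unfold Spec_count_run_groups_by_type
  show count_run_groups_by_type data = count_run_groups_by_type_alt data
  simp only [count_run_groups_by_type, count_run_groups_by_type_alt]
  rw [pvFoldA_eq, pvPairsB_eq]
  set ps := data.filterMap pvVP with hps
  set val : String → Int := fun t => PySem.Set.len (PySem.Set.ofList (pvRgs ps t)) with hval
  set dA := ps.foldl (fun d p => d.modify p.1 PySem.Set.empty (fun s => s.add p.2))
    (PySem.Dict.empty : PySem.Dict String (PySem.Set String)) with hdA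
  set dB := ps.foldl (fun res p =>
      if res.contains p.1 then res
      else res.insert p.1 (PySem.Set.len (PySem.Set.ofList
        (ps.filterMap (fun q => if q.1 == p.1 then some q.2 else none)))))
    (PySem.Dict.empty : PySem.Dict String Int) with hdB
  have hdB' : dB = ps.foldl (fun res p =>
      if res.contains p.1 then res else res.insert p.1 (val p.1))
      (PySem.Dict.empty : PySem.Dict String Int) := by rw [hdB]; rfl
  have hkA : dA.keys = PySem.Set.ofList (ps.map Prod.fst) := by rw [hdA]; exact pvA_keys ps
  have hkB : dB.keys = PySem.Set.ofList (ps.map Prod.fst) := by rw [hdB']; exact pvB_keys ps val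
  have hndA : dA.keys.Nodup := by rw [hkA]; exact PySem.Set.nodup_ofList _
  have hndB : dB.keys.Nodup := by rw [hkB]; exact PySem.Set.nodup_ofList _
  rw [PySem.Dict.items_eq_map_keys dA hndA PySem.Set.empty,
    PySem.Dict.items_eq_map_keys dB hndB 0, List.map_map, hkA, hkB]
  apply List.map_congr_left
  intro t htmem
  have htps : t ∈ ps.map Prod.fst := by
    have h := htmem
    rw [PySem.Set.mem_ofList] at h
    exact h
  have hAval : dA.getD t PySem.Set.empty = PySem.Set.ofList (pvRgs ps t) := by
    rw [hdA, pvA_getD]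
    simp [PySem.Dict.getD_empty, PySem.Set.update_nil_left]
  have hBval : dB.getD t 0 = val t := by
    rw [PySem.Dict.getD_eq_get?_getD, hdB', pvB_get? ps val _ t]
    simp [PySem.Dict.contains_empty, htps]
  simp only [Function.comp_def, hAval, hBval, hval, PySem.Set.len]
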